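-- pv_equiv track=rewrite | github.com/pwycl/IncrementalCoverage | script/plot.py | getTimeIndex
-- ===== SOURCE A (Python) =====
-- def getTimeIndex(srcList: list, timeMax: int):
--     index = 0
--     TimeIndex = []
--     for time in range(timeMax + 1):
--         if (time == 0):
--             TimeIndex.append( (time,-1) )
--             continue
--
--         while (     index < len(srcList)
--                 and srcList[index] <= time):
--             index = index + 1
--         TimeIndex.append( (time, index-1) )
--     return TimeIndex
-- ===== SOURCE B (Python) =====
-- def getTimeIndex(srcList: list, timeMax: int):
--     # prefix-maximum table: M[i] = max(srcList[0..i]); M is non-decreasing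
--     M = []
--     m = None
--     for x in srcList:
--         m = x if (m is None or x > m) else m
--         M.append(m)
--     out = []
--     if timeMax >= 0:
--         out.append((0, -1))
--     for t in range(1, timeMax + 1):
--         # bisect_right(M, t): number of prefix-max entries <= t
--         lo, hi = 0, len(M)
--         while lo < hi:
--             mid = (lo + hi) // 2
--             if M[mid] <= t:
--                 lo = mid + 1
--             else:
--                 hi = mid
--         out.append((t, lo - 1))
--     return out
-- ===== Notes on version B (the rewrite author's own statement) =====
-- stated objective: alternative
-- what changed: Replaces A's single stateful pointer sweep with a precomputed prefix-maximum table plus a per-time binary search (bisect_right) into it.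
import Mathlib
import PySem

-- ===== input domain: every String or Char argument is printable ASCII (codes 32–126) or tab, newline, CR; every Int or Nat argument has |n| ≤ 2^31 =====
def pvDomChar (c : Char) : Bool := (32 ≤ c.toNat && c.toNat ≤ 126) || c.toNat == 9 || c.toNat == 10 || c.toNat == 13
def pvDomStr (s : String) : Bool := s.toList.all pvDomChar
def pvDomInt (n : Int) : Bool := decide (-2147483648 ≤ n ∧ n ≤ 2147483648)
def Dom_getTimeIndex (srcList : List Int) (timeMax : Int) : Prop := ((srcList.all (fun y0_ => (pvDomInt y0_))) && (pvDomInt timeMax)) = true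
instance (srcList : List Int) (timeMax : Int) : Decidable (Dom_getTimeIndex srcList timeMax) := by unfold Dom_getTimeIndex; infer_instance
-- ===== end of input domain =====

-- B replaces A's stateful pointer sweep by a prefix-maximum table plus a per-time
-- binary search; equal cost class (alternative decomposition), return value proved equal.

-- ===== PORT A =====
-- the inner 'while index < len(srcList) and srcList[index] <= time: index += 1'
-- (guard checks index < length first, so List.getD is exact Python indexing here)
-- fuel only makes the recursion structural; with fuel ≥ len - index it never runs out
def pvAdvance (srcList : List Int) (time : Int) : Nat → Nat → Nat
  | 0, index => index
  | fuel + 1, index =>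
    if index < srcList.length ∧ srcList.getD index 0 ≤ time then
      pvAdvance srcList time fuel (index + 1)
    else index

-- the body of A's 'for time in range(timeMax + 1)' loop over state (index, TimeIndex)
def pvStepA (srcList : List Int) (st : Nat × List (Int × Int)) (time : Int) :
    Nat × List (Int × Int) :=
  if time = 0 then (st.1, st.2 ++ [(time, -1)])
  else
    let index := pvAdvance srcList time srcList.length st.1
    (index, st.2 ++ [(time, (index : Int) - 1)])

def getTimeIndex (srcList : List Int) (timeMax : Int) : List (Int × Int) :=
  ((PySem.List.pyRange 0 (timeMax + 1) 1).foldl (pvStepA srcList) (0, [])).2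

-- ===== PORT B =====
-- B's first loop: M[i] = max(srcList[0..i]), running maximum carried as Option
def pvPrefixMax (srcList : List Int) : List Int :=
  (srcList.foldl
    (fun (st : Option Int × List Int) x =>
      let m : Int := match st.1 with
        | none => x
        | some m0 => if x > m0 then x else m0
      (some m, st.2 ++ [m])) (none, [])).2

-- B's inner while loop: bisect_right(M, t) (mid < hi ≤ len M, so getD is exact indexing)
-- fuel only makes the recursion structural; with fuel ≥ hi - lo it never runs out
def pvBisect (M : List Int) (t : Int) : Nat → Nat → Nat → Nat
  | 0, lo, _ => lo
  | fuel + 1, lo, hi =>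
    if lo < hi then
      let mid := (lo + hi) / 2
      if M.getD mid 0 ≤ t then pvBisect M t fuel (mid + 1) hi
      else pvBisect M t fuel lo mid
    else lo

def getTimeIndex_alt (srcList : List Int) (timeMax : Int) : List (Int × Int) :=
  let M := pvPrefixMax srcList
  let head : List (Int × Int) := if timeMax ≥ 0 then [((0 : Int), (-1 : Int))] else []
  head ++ (PySem.List.pyRange 1 (timeMax + 1) 1).map
      (fun t => (t, (pvBisect M t M.length 0 M.length : Int) - 1))

-- ===== PRECONDITION & SPEC =====
def Spec_getTimeIndex (srcList : List Int) (timeMax : Int) (out : List (Int × Int)) : Prop := out = getTimeIndex_alt srcList timeMax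
instance (srcList : List Int) (timeMax : Int) (out : List (Int × Int)) : Decidable (Spec_getTimeIndex srcList timeMax out) := by unfold Spec_getTimeIndex; infer_instance

-- ===== CLAIM (what is proved, stated in full; the proofs are below) =====
def Claim_equal_getTimeIndex : Prop := ∀ (srcList : List Int) (timeMax : Int), Dom_getTimeIndex srcList timeMax → Spec_getTimeIndex srcList timeMax (getTimeIndex srcList timeMax)

-- ===== LEMMAS AND PROOFS =====

-- length of the longest prefix of l all of whose elements are ≤ t
def pvCnt (t : Int) : List Int → Nat
  | [] => 0
  | x :: xs => if x ≤ t then pvCnt t xs + 1 else 0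

lemma pvCnt_le_length (t : Int) (l : List Int) : pvCnt t l ≤ l.length := by
  induction l with
  | nil => simp [pvCnt]
  | cons x xs ih => simp only [pvCnt, List.length_cons]; split <;> omega

lemma pvCnt_getD_lt (t : Int) (l : List Int) :
    ∀ j, j < pvCnt t l → l.getD j 0 ≤ t := by
  induction l with
  | nil => intro j h; simp [pvCnt] at h
  | cons x xs ih =>
    intro j h
    simp only [pvCnt] at h
    by_cases hx : x ≤ t
    · simp only [if_pos hx] at h
      cases j with
      | zero => simpa using hx
      | succ j => exact ih j (by omega)
    · simp [if_neg hx] at h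
lemma pvCnt_getD_self (t : Int) (l : List Int) :
    pvCnt t l < l.length → ¬ l.getD (pvCnt t l) 0 ≤ t := by
  induction l with
  | nil => simp [pvCnt]
  | cons x xs ih =>
    simp only [pvCnt, List.length_cons]
    by_cases hx : x ≤ t
    · rw [if_pos hx]
      intro h
      simpa using ih (by omega)
    · rw [if_neg hx]; intro _; simpa using hx

lemma pvCnt_mono (s t : Int) (l : List Int) (hst : s ≤ t) : pvCnt s l ≤ pvCnt t l := by
  induction l with
  | nil => simp [pvCnt]
  | cons x xs ih =>
    simp only [pvCnt]
    by_cases hs : x ≤ s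
    · rw [if_pos hs, if_pos (le_trans hs hst)]; omega
    · rw [if_neg hs]; omega

lemma pvAdvance_eq (l : List Int) (t : Int) :
    ∀ (k idx : Nat), l.length - idx ≤ k → idx ≤ pvCnt t l → pvAdvance l t k idx = pvCnt t l := by
  intro k
  induction k with
  | zero =>
    intro idx hk h
    have hle := pvCnt_le_length t l
    simp only [pvAdvance]
    omega
  | succ k ih =>
    intro idx hk h
    simp only [pvAdvance]
    split
    · rename_i hg
      apply ih
      · omega
      · rcases Nat.lt_or_ge idx (pvCnt t l) with hlt | hge
        · omega
        · exfalso
          have he : idx = pvCnt t l := by omega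
          exact pvCnt_getD_self t l (he ▸ hg.1) (he ▸ hg.2)
    · rename_i hg
      rcases Nat.lt_or_ge idx (pvCnt t l) with hlt | hge
      · exact absurd ⟨lt_of_lt_of_le hlt (pvCnt_le_length t l), pvCnt_getD_lt t l idx hlt⟩ hg
      · omega

-- recursive characterisation of B's prefix-max loop
def pvPM : Option Int → List Int → List Int
  | _, [] => []
  | acc, x :: xs =>
    let m : Int := match acc with
      | none => x
      | some m0 => if x > m0 then x else m0
    m :: pvPM (some m) xs

lemma pvPrefixMax_foldl (l : List Int) :
    ∀ (acc : Option Int) (out : List Int),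
      (l.foldl
        (fun (st : Option Int × List Int) x =>
          let m : Int := match st.1 with
            | none => x
            | some m0 => if x > m0 then x else m0
          (some m, st.2 ++ [m])) (acc, out)).2 = out ++ pvPM acc l := by
  induction l with
  | nil => intro acc out; simp [pvPM]
  | cons x xs ih =>
    intro acc out
    simp only [List.foldl_cons, pvPM]
    rw [ih]
    cases acc <;> simp

lemma pvPrefixMax_eq (l : List Int) : pvPrefixMax l = pvPM none l := by
  unfold pvPrefixMax
  simpa using pvPrefixMax_foldl l none []

lemma pvPM_length (l : List Int) : ∀ acc, (pvPM acc l).length = l.length := by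
  induction l with
  | nil => intro acc; simp [pvPM]
  | cons x xs ih => intro acc; simp [pvPM, ih]

lemma pvPM_some_getD (t : Int) (l : List Int) :
    ∀ (m : Int) (j : Nat), j < l.length →
      ((pvPM (some m) l).getD j 0 ≤ t ↔ (m ≤ t ∧ j < pvCnt t l)) := by
  induction l with
  | nil => intro m j h; simp at h
  | cons x xs ih =>
    intro m j h
    simp only [pvPM]
    cases j with
    | zero =>
      simp only [List.getD_cons_zero, pvCnt]
      by_cases hx : x ≤ t
      · rw [if_pos hx]
        constructor
        · intro hm
          refine ⟨?_, by omega⟩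
          by_cases hc : x > m
          · rw [if_pos hc] at hm; omega
          · rwa [if_neg hc] at hm
        · intro ⟨hm, _⟩
          by_cases hc : x > m
          · rwa [if_pos hc]
          · rwa [if_neg hc]
      · rw [if_neg hx]
        constructor
        · intro hm
          exfalso
          by_cases hc : x > m
          · rw [if_pos hc] at hm; omega
          · rw [if_neg hc] at hm; omega
        · intro ⟨_, hj⟩; omega
    | succ j =>
      simp only [List.getD_cons_succ, pvCnt]
      rw [ih _ j (by simpa using Nat.lt_of_succ_lt_succ h)]
      by_cases hx : x ≤ t
      · rw [if_pos hx]
        constructor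
        · intro ⟨hm, hj⟩
          by_cases hc : x > m
          · rw [if_pos hc] at hm; exact ⟨by omega, by omega⟩
          · rw [if_neg hc] at hm; exact ⟨hm, by omega⟩
        · intro ⟨hm, hj⟩
          by_cases hc : x > m
          · rw [if_pos hc]; exact ⟨hx, by omega⟩
          · rw [if_neg hc]; exact ⟨hm, by omega⟩
      · rw [if_neg hx]
        constructor
        · intro ⟨hm, hj⟩
          exfalso
          by_cases hc : x > m
          · rw [if_pos hc] at hm; omega
          · rw [if_neg hc] at hm
            -- hj : j < pvCnt t xs is fine, but hm with ¬ x ≤ t: need contradiction from first component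
            exact hx (by
              by_cases hc2 : x > m
              · omega
              · omega)
        · intro ⟨_, hj⟩; omega

lemma pvPM_none_getD (t : Int) (l : List Int) :
    ∀ j, j < l.length → ((pvPM none l).getD j 0 ≤ t ↔ j < pvCnt t l) := by
  cases l with
  | nil => intro j h; simp at h
  | cons x xs =>
    intro j h
    simp only [pvPM]
    cases j with
    | zero =>
      simp only [List.getD_cons_zero, pvCnt]
      by_cases hx : x ≤ t <;> simp [hx]
    | succ j =>
      simp only [List.getD_cons_succ, pvCnt]
      rw [pvPM_some_getD t xs x j (by simpa using Nat.lt_of_succ_lt_succ h)]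
      by_cases hx : x ≤ t
      · rw [if_pos hx]
        constructor
        · intro ⟨_, hj⟩; omega
        · intro hj; exact ⟨hx, by omega⟩
      · rw [if_neg hx]
        constructor
        · intro ⟨hm, _⟩; omega
        · intro hj; omega

lemma pvBisect_eq (M : List Int) (t : Int) (c : Nat)
    (hkey : ∀ j, j < M.length → (M.getD j 0 ≤ t ↔ j < c)) :
    ∀ (k lo hi : Nat), hi - lo ≤ k → lo ≤ c → c ≤ hi → hi ≤ M.length →
      pvBisect M t k lo hi = c := by
  intro k
  induction k with
  | zero =>
    intro lo hi hk h1 h2 h3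
    simp only [pvBisect]
    omega
  | succ k ih =>
    intro lo hi hk h1 h2 h3
    simp only [pvBisect]
    split
    · rename_i hlt
      show (if M.getD ((lo + hi) / 2) 0 ≤ t then pvBisect M t k ((lo + hi) / 2 + 1) hi
            else pvBisect M t k lo ((lo + hi) / 2)) = c
      split
      · rename_i hm
        have hmid : (lo + hi) / 2 < c := by
          have := (hkey ((lo + hi) / 2) (by omega)).mp hm
          omega
        exact ih _ _ (by omega) (by omega) h2 h3
      · rename_i hm
        have hmid : c ≤ (lo + hi) / 2 := by
          by_contra hcon
          exact hm ((hkey ((lo + hi) / 2) (by omega)).mpr (by omega))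
        exact ih _ _ (by omega) h1 hmid (by omega)
    · rename_i hge
      omega

lemma pvBisect_full (l : List Int) (t : Int) :
    pvBisect (pvPrefixMax l) t (pvPrefixMax l).length 0 (pvPrefixMax l).length = pvCnt t l := by
  rw [pvPrefixMax_eq]
  have hlen : (pvPM none l).length = l.length := pvPM_length l none
  refine pvBisect_eq _ t (pvCnt t l) ?_ ((pvPM none l).length) 0 ((pvPM none l).length)
      (by omega) (by omega) ?_ (le_refl _)
  · intro j hj
    exact pvPM_none_getD t l j (by omega)
  · rw [hlen]; exact pvCnt_le_length t l

-- A's fold over times 0..n, characterised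
lemma pvFoldA (l : List Int) (n : Nat) :
    (PySem.List.pyRange 0 ((n : Int) + 1) 1).foldl (pvStepA l) (0, []) =
      ((if n = 0 then 0 else pvCnt (n : Int) l),
       ((0 : Int), (-1 : Int)) ::
         (PySem.List.pyRange 1 ((n : Int) + 1) 1).map
           (fun t => (t, (pvCnt t l : Int) - 1))) := by
  induction n with
  | zero =>
    have h1 : PySem.List.pyRange 0 ((0 : Int) + 1) 1 = [(0 : Int)] := by
      simpa using PySem.List.pyRange_one_singleton (a := (0 : Int))
    rw [show ((0 : Nat) : Int) = (0 : Int) by norm_num, h1]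
    simp [pvStepA, PySem.List.pyRange_one_eq_nil]
  | succ n ih =>
    have hsplit : PySem.List.pyRange 0 (((n + 1 : Nat) : Int) + 1) 1 =
        PySem.List.pyRange 0 ((n : Int) + 1) 1 ++ [((n : Int) + 1)] := by
      push_cast
      rw [PySem.List.pyRange_one_succ_right (by positivity)]
    rw [hsplit, List.foldl_append, ih]
    have hne : ((n : Int) + 1) ≠ 0 := by omega
    have hadv : pvAdvance l ((n : Int) + 1) l.length (if n = 0 then 0 else pvCnt (n : Int) l) =
        pvCnt ((n : Int) + 1) l := by
      apply pvAdvance_eq l _ l.length _ (by omega)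
      split
      · omega
      · exact pvCnt_mono _ _ l (by omega)
    have hsplit2 : PySem.List.pyRange 1 (((n + 1 : Nat) : Int) + 1) 1 =
        PySem.List.pyRange 1 ((n : Int) + 1) 1 ++ [((n : Int) + 1)] := by
      push_cast
      rw [PySem.List.pyRange_one_succ_right (by omega)]
    simp only [List.foldl_cons, List.foldl_nil, pvStepA, if_neg hne, hadv, hsplit2,
      List.map_append, List.map_cons, List.map_nil, List.cons_append,
      if_neg (show ¬ (n + 1 = 0) by omega)]
    push_cast
    rfl

-- ===== VERDICT (by name: the statement is the Claim_ definition above) =====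
theorem getTimeIndex_spec : Claim_equal_getTimeIndex := by
  intro srcList timeMax _
  unfold Spec_getTimeIndex getTimeIndex getTimeIndex_alt
  by_cases h : timeMax ≥ 0
  · obtain ⟨n, rfl⟩ : ∃ n : Nat, timeMax = (n : Int) := ⟨timeMax.toNat, by omega⟩
    rw [pvFoldA srcList n, if_pos h]
    simp only [List.singleton_append]
    congr 1
    apply List.map_congr_left
    intro t _
    rw [pvBisect_full srcList t]
  · have h1 : PySem.List.pyRange 0 (timeMax + 1) 1 = [] :=
      PySem.List.pyRange_one_eq_nil (by omega)
    have h2 : PySem.List.pyRange 1 (timeMax + 1) 1 = [] :=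
      PySem.List.pyRange_one_eq_nil (by omega)
    rw [h1, h2, if_neg h]
    simp
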